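-- pv_equiv track=rewrite | github.com/DeepFoldProtein/plmMSA | src/plmmsa/templates/render.py | kept_template_span
-- ===== SOURCE A (Python) =====
-- from collections.abc import Sequence
--
-- def kept_template_span(
--     columns: Sequence[tuple[int, int]],
-- ) -> tuple[int, int] | None:
--     """Min and max template residue indices that landed in match
--     columns. Returns `None` when no template residue was placed.
--
--     Used to re-interval the header after the no-lowercase filter:
--     `new_start = orig_start + kept_lo`, `new_end = orig_start + kept_hi`
--     (both 1-based when `orig_start` is). When OTalign drops interior
--     template residues, `kept_hi - kept_lo + 1` exceeds the number of
--     placed residues — see PLAN §2 for the trade-off.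
--     """
--     lo: int | None = None
--     hi: int | None = None
--     for qi, ti in columns:
--         if qi >= 0 and ti >= 0:
--             if lo is None or ti < lo:
--                 lo = ti
--             if hi is None or ti > hi:
--                 hi = ti
--     if lo is None or hi is None:
--         return None
--     return lo, hi
-- ===== SOURCE B (Python) =====
-- def kept_template_span(columns):
--     """Sort the kept template indices; the span is then simply the first
--     and last element of the sorted list (None when nothing was kept)."""
--     vals = sorted(ti for qi, ti in columns if qi >= 0 and ti >= 0)
--     if not vals:
--         return None
--     return vals[0], vals[-1]
-- ===== Notes on version B (the rewrite author's own statement) =====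
-- stated objective: alternative
-- what changed: Replaces A's fused single-pass loop with Optional lo/hi tracking by sorting the kept template indices once and reading the span off the sorted list's endpoints (vals[0], vals[-1]).
import Mathlib
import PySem

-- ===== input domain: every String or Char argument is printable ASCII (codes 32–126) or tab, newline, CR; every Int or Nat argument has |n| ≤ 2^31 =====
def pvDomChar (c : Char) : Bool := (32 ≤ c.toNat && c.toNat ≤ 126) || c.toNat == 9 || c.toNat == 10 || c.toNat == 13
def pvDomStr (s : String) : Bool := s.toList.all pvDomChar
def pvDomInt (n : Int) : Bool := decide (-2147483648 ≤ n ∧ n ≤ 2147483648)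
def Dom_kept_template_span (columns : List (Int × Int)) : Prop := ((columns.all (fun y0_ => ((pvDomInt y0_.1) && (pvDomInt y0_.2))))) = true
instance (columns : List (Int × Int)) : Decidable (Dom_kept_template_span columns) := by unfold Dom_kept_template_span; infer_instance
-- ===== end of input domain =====

-- B sorts the kept template indices once and reads the span off the sorted list's endpoints, instead of A's fused loop with Optional lo/hi tracking (objective: alternative).

-- ===== PORT A =====
-- A's loop over columns, carrying the Optional lo/hi state exactly as the Python does.
def ktsGo : List (Int × Int) → Option Int → Option Int → Option Int × Option Int
  | [], lo, hi => (lo, hi)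
  | (qi, ti) :: rest, lo, hi =>
    if qi ≥ 0 ∧ ti ≥ 0 then
      let lo' := match lo with
        | none => some ti
        | some l => if ti < l then some ti else some l
      let hi' := match hi with
        | none => some ti
        | some h => if ti > h then some ti else some h
      ktsGo rest lo' hi'
    else
      ktsGo rest lo hi

def kept_template_span (columns : List (Int × Int)) : Option (Int × Int) :=
  match ktsGo columns none none with
  | (some l, some h) => some (l, h)
  | _ => none

-- ===== PORT B =====
def kept_template_span_alt (columns : List (Int × Int)) : Option (Int × Int) :=
  let vals := PySem.List.sorted ((columns.filter (fun p => decide (p.1 ≥ 0) && decide (p.2 ≥ 0))).map Prod.snd) (fun x => x) false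
  match vals with
  | [] => none
  | v :: t => some (v, (v :: t).getLast (by simp))   -- vals[0], vals[-1] on the guarded nonempty list

-- ===== PRECONDITION & SPEC =====
def Spec_kept_template_span (columns : List (Int × Int)) (out : Option (Int × Int)) : Prop := out = kept_template_span_alt columns
instance (columns : List (Int × Int)) (out : Option (Int × Int)) : Decidable (Spec_kept_template_span columns out) := by unfold Spec_kept_template_span; infer_instance

-- ===== CLAIM =====
def Claim_equal_kept_template_span : Prop := ∀ (columns : List (Int × Int)), Dom_kept_template_span columns → Spec_kept_template_span columns (kept_template_span columns)

-- ===== LEMMAS AND PROOFS =====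
def ktsVals (columns : List (Int × Int)) : List Int :=
  (columns.filter (fun p => decide (p.1 ≥ 0) && decide (p.2 ≥ 0))).map Prod.snd

lemma ktsGo_some (cols : List (Int × Int)) : ∀ (l h : Int),
    ktsGo cols (some l) (some h) =
      (some ((ktsVals cols).foldl min l), some ((ktsVals cols).foldl max h)) := by
  induction cols with
  | nil => intro l h; simp [ktsGo, ktsVals]
  | cons p rest ih =>
    intro l h
    obtain ⟨qi, ti⟩ := p
    by_cases hc : qi ≥ 0 ∧ ti ≥ 0
    · have hmin : (if ti < l then some ti else some l) = some (min l ti) := by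
        split_ifs with h1 <;> simp [min_def] <;> omega
      have hmax : (if ti > h then some ti else some h) = some (max h ti) := by
        split_ifs with h1 <;> simp [max_def] <;> omega
      simp only [ktsGo, if_pos hc, hmin, hmax, ih]
      simp [ktsVals, hc.1, hc.2]
    · have : ¬ ((decide (qi ≥ 0) && decide (ti ≥ 0)) = true) := by
        simp; omega
      simp only [ktsGo, if_neg hc, ih]
      simp [ktsVals, this]

lemma kts_A_minmax (cols : List (Int × Int)) :
    kept_template_span cols =
      match ktsVals cols with
      | [] => none
      | v :: t => some (t.foldl min v, t.foldl max v) := by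
  induction cols with
  | nil => rfl
  | cons p rest ih =>
    obtain ⟨qi, ti⟩ := p
    by_cases hc : qi ≥ 0 ∧ ti ≥ 0
    · simp only [kept_template_span, ktsGo, if_pos hc, ktsGo_some]
      simp [ktsVals, hc.1, hc.2]
    · have hb : ¬ ((decide (qi ≥ 0) && decide (ti ≥ 0)) = true) := by
        simp; omega
      simp only [kept_template_span, ktsGo, if_neg hc]
      simp only [ktsVals, List.filter_cons, hb] at *
      simpa [kept_template_span] using ih

lemma foldl_min_seed : ∀ (t : List Int) (v : Int), t.foldl min v ≤ v := by
  intro t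
  induction t with
  | nil => intro v; simp
  | cons x xs ih =>
    intro v
    calc xs.foldl min (min v x) ≤ min v x := ih _
      _ ≤ v := min_le_left _ _

lemma foldl_min_mem : ∀ (t : List Int) (v : Int), t.foldl min v ∈ v :: t := by
  intro t
  induction t with
  | nil => intro v; simp
  | cons x xs ih =>
    intro v
    have h := ih (min v x)
    simp only [List.foldl]
    rcases List.mem_cons.mp h with h1 | h1
    · rw [h1]
      rcases min_choice v x with h2 | h2 <;> rw [h2] <;> simp
    · simp [h1]

lemma foldl_min_le : ∀ (t : List Int) (v x : Int), x ∈ v :: t → t.foldl min v ≤ x := by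
  intro t
  induction t with
  | nil => intro v x hx; simp at hx; simp [hx]
  | cons y ys ih =>
    intro v x hx
    simp only [List.foldl]
    rcases List.mem_cons.mp hx with h | h
    · subst h
      calc ys.foldl min (min x y) ≤ min x y := foldl_min_seed _ _
        _ ≤ x := min_le_left _ _
    · rcases List.mem_cons.mp h with h2 | h2
      · subst h2
        calc ys.foldl min (min v x) ≤ min v x := foldl_min_seed _ _
          _ ≤ x := min_le_right _ _
      · exact ih _ _ (by simp [h2])

lemma foldl_max_seed : ∀ (t : List Int) (v : Int), v ≤ t.foldl max v := by
  intro t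
  induction t with
  | nil => intro v; simp
  | cons x xs ih =>
    intro v
    calc v ≤ max v x := le_max_left _ _
      _ ≤ xs.foldl max (max v x) := ih _

lemma foldl_max_mem : ∀ (t : List Int) (v : Int), t.foldl max v ∈ v :: t := by
  intro t
  induction t with
  | nil => intro v; simp
  | cons x xs ih =>
    intro v
    have h := ih (max v x)
    simp only [List.foldl]
    rcases List.mem_cons.mp h with h1 | h1
    · rw [h1]
      rcases max_choice v x with h2 | h2 <;> rw [h2] <;> simp
    · simp [h1]

lemma foldl_max_ge : ∀ (t : List Int) (v x : Int), x ∈ v :: t → x ≤ t.foldl max v := by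
  intro t
  induction t with
  | nil => intro v x hx; simp at hx; simp [hx]
  | cons y ys ih =>
    intro v x hx
    simp only [List.foldl]
    rcases List.mem_cons.mp hx with h | h
    · subst h
      calc x ≤ max x y := le_max_left _ _
        _ ≤ ys.foldl max (max x y) := foldl_max_seed _ _
    · rcases List.mem_cons.mp h with h2 | h2
      · subst h2
        calc x ≤ max v x := le_max_right _ _
          _ ≤ ys.foldl max (max v x) := foldl_max_seed _ _
      · exact ih _ _ (by simp [h2])

lemma pairwise_getLast_ge (l : List Int) (hl : l ≠ []) (hp : l.Pairwise (· ≤ ·)) :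
    ∀ x ∈ l, x ≤ l.getLast hl := by
  induction l with
  | nil => exact absurd rfl hl
  | cons a t ih =>
    intro x hx
    cases t with
    | nil => simp at hx; simp [hx, List.getLast]
    | cons b u =>
      have hp' := (List.pairwise_cons.mp hp).2
      have ha := (List.pairwise_cons.mp hp).1
      rcases List.mem_cons.mp hx with h | h
      · subst h
        have hlast : (b :: u).getLast (by simp) ∈ b :: u := List.getLast_mem _
        have := ha _ hlast
        simpa [List.getLast_cons] using this
      · have := ih (by simp) hp' x h
        simpa [List.getLast_cons] using this

lemma sorted_head_last (l : List Int) (m : Int) (ts : List Int)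
    (hs : PySem.List.sorted l (fun x => x) false = m :: ts) (v : Int) (t : List Int)
    (hl : l = v :: t) :
    m = t.foldl min v ∧ (m :: ts).getLast (by simp) = t.foldl max v := by
  subst hl
  have hperm : (m :: ts).Perm (v :: t) := hs ▸ PySem.List.sorted_perm _ _ _
  have hpw : (m :: ts).Pairwise (fun a b => a ≤ b) := by
    have := PySem.List.sorted_pairwise (xs := v :: t) (key := fun x : Int => x)
    rw [hs] at this; exact this
  have hmem : ∀ x : Int, x ∈ m :: ts ↔ x ∈ v :: t := fun x => hperm.mem_iff
  constructor
  · have h1 : m ≤ t.foldl min v :=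
      PySem.List.key_head_sorted_le (xs := v :: t) (key := fun x : Int => x) hs _ (foldl_min_mem t v)
    have h2 : t.foldl min v ≤ m := foldl_min_le t v m ((hmem m).mp (by simp))
    omega
  · have hlastmem : (m :: ts).getLast (by simp) ∈ m :: ts := List.getLast_mem _
    have h1 : (m :: ts).getLast (by simp) ≤ t.foldl max v :=
      foldl_max_ge t v _ ((hmem _).mp hlastmem)
    have h2 : t.foldl max v ≤ (m :: ts).getLast (by simp) :=
      pairwise_getLast_ge (m :: ts) (by simp) hpw _ ((hmem _).mpr (foldl_max_mem t v))
    omega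

-- ===== VERDICT =====
theorem kept_template_span_spec : Claim_equal_kept_template_span := by
  intro cols _
  unfold Spec_kept_template_span
  rw [kts_A_minmax]
  show (match ktsVals cols with
        | [] => none
        | v :: t => some (t.foldl min v, t.foldl max v)) =
       (match PySem.List.sorted (ktsVals cols) (fun x => x) false with
        | [] => none
        | v :: t => some (v, (v :: t).getLast (by simp)))
  cases hv : ktsVals cols with
  | nil => rfl
  | cons v t =>
    cases hs : PySem.List.sorted (v :: t) (fun x => x) false with
    | nil =>
      have hp := PySem.List.sorted_perm (v :: t) (fun x : Int => x) false
      rw [hs] at hp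
      exact absurd hp.length_eq (by simp)
    | cons m ts =>
      obtain ⟨h1, h2⟩ := sorted_head_last (v :: t) m ts hs v t rfl
      simp only [Option.some.injEq, Prod.mk.injEq]
      exact ⟨h1.symm, h2.symm⟩
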